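-- pv_equiv track=rewrite | github.com/jdegrand/AdventOfCode | 2019/Day4/4.py | meetsMoreCriteria
-- ===== SOURCE A (Python) =====
-- def meetsMoreCriteria(number):
--     previous = -1
--     st = str(number)
--     count = 1
--     counts = set()
--     for i in range(len(st)):
--         if previous == int(st[i]):
--             count += 1
--         elif previous > int(st[i]):
--             return False
--         else:
--             counts.add(count)
--             count = 1
--         previous = int(st[i])
--     counts.add(count)
--     return 2 in counts
-- ===== SOURCE B (Python) =====
-- def meetsMoreCriteria(number):
--     digits = [int(c) for c in str(number)]
--     if digits != sorted(digits):
--         return False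
--     runs = []
--     for d in digits:
--         if runs and runs[-1][0] == d:
--             runs[-1][1] += 1
--         else:
--             runs.append([d, 1])
--     return any(n == 2 for _, n in runs)
-- ===== Notes on version B (the rewrite author's own statement) =====
-- stated objective: idiomatic
-- what changed: A's single fused loop with early return, a running previous/count and a set of counts is replaced by a decomposed pipeline: parse all digits, compare with sorted(digits) to check non-decreasing order, then build a run-length list and ask whether any run has length exactly 2.
import Mathlib
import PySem

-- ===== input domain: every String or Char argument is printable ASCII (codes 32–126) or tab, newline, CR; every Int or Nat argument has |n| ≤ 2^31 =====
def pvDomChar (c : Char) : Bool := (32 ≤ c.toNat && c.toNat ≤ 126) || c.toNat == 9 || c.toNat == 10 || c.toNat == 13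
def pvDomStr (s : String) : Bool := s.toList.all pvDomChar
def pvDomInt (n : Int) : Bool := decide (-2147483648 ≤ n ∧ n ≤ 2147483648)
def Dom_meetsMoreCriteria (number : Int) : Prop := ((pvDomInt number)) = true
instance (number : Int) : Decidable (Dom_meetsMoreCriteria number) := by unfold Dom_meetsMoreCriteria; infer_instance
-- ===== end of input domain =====

-- B replaces A's fused early-return loop with a decomposed pipeline (parse digits,
-- compare with the sorted digits, then scan run lengths); objective: idiomatic.

-- ===== PORT A =====
-- the for-loop of A: state (previous, count, counts); `none` = ValueError from int(st[i])
def pvGoA : List Char → Int → Int → PySem.Set Int → Option Bool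
  | [], _, count, counts => some (decide ((2 : Int) ∈ counts.add count))
  | c :: rest, previous, count, counts =>
    match PySem.Int.ofChars? [c] with
    | none => none
    | some d =>
      if previous = d then pvGoA rest d (count + 1) counts
      else if previous > d then some false
      else pvGoA rest d 1 (counts.add count)

def meetsMoreCriteria (number : Int) : Bool :=
  -- `.getD false` only covers the `none` (ValueError) case, excluded by Pre_
  (pvGoA (PySem.Int.toChars number) (-1) 1 (PySem.Set.ofList [])).getD false

-- ===== PORT B =====
-- digits = [int(c) for c in str(number)]; `none` = ValueError
def pvParseDigits? : List Char → Option (List Int)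
  | [] => some []
  | c :: cs =>
    match PySem.Int.ofChars? [c], pvParseDigits? cs with
    | some d, some ds => some (d :: ds)
    | _, _ => none

-- one step of B's run-building loop
def pvAddRun (runs : List (Int × Int)) (d : Int) : List (Int × Int) :=
  match runs.getLast? with
  | some last => if last.1 = d then runs.dropLast ++ [(last.1, last.2 + 1)] else runs ++ [(d, 1)]
  | none => runs ++ [(d, 1)]

def meetsMoreCriteria_alt (number : Int) : Bool :=
  match pvParseDigits? (PySem.Int.toChars number) with
  | none => false   -- ValueError, excluded by Pre_
  | some digits =>
    if digits ≠ PySem.List.sorted digits (fun x => x) false then false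
    else (digits.foldl pvAddRun []).any (fun r => r.2 == 2)

-- ===== PRECONDITION & SPEC =====
-- Pre_ excludes exactly the negative numbers: there str(number) starts with '-' and
-- int('-') raises ValueError in A (and in B).
def Pre_meetsMoreCriteria (number : Int) : Prop := 0 ≤ number
instance (number : Int) : Decidable (Pre_meetsMoreCriteria number) := by
  unfold Pre_meetsMoreCriteria; infer_instance
def pvWitness_meetsMoreCriteria : Int := (122345)

def Spec_meetsMoreCriteria (number : Int) (out : Bool) : Prop := out = meetsMoreCriteria_alt number
instance (number : Int) (out : Bool) : Decidable (Spec_meetsMoreCriteria number out) := by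
  unfold Spec_meetsMoreCriteria; infer_instance

-- ===== CLAIM (what is proved, stated in full; the proofs are below) =====
def Claim_equal_meetsMoreCriteria : Prop := ∀ (number : Int), Dom_meetsMoreCriteria number → Pre_meetsMoreCriteria number → Spec_meetsMoreCriteria number (meetsMoreCriteria number)

-- ===== LEMMAS AND PROOFS =====

-- proof-side run-length function: pvRunsAux d n ds = run lengths of (d :: ds) with the
-- first run already counted n deep
def pvRunsAux (d n : Int) : List Int → List (Int × Int)
  | [] => [(d, n)]
  | e :: es => if d = e then pvRunsAux d (n + 1) es else (d, n) :: pvRunsAux e 1 es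

-- B's foldl builds exactly pvRunsAux
theorem pvFoldl_addRun (ds : List Int) : ∀ (acc : List (Int × Int)) (d n : Int),
    ds.foldl pvAddRun (acc ++ [(d, n)]) = acc ++ pvRunsAux d n ds := by
  induction ds with
  | nil => intro acc d n; simp [pvRunsAux]
  | cons e es ih =>
    intro acc d n
    by_cases h : d = e
    · simp [List.foldl_cons, pvAddRun, pvRunsAux, h, ih]
    · have step : pvAddRun (acc ++ [(d, n)]) e = (acc ++ [(d, n)]) ++ [(e, 1)] := by
        simp [pvAddRun, h]
      rw [List.foldl_cons, step, ih (acc ++ [(d, n)]) e 1]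
      simp [pvRunsAux, h]

-- proof-side pure version of A's loop (parsing stripped off)
def pvGoPure : List Int → Int → Int → PySem.Set Int → Bool
  | [], _, cnt, counts => decide ((2 : Int) ∈ counts.add cnt)
  | d :: ds, p, cnt, counts =>
    if p = d then pvGoPure ds d (cnt + 1) counts
    else if p > d then false
    else pvGoPure ds d 1 (counts.add cnt)

theorem pvGoA_eq_pure (cs : List Char) : ∀ (ds : List Int) (p cnt : Int) (counts : PySem.Set Int),
    pvParseDigits? cs = some ds →
    pvGoA cs p cnt counts = some (pvGoPure ds p cnt counts) := by
  induction cs with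
  | nil =>
    intro ds p cnt counts h
    simp [pvParseDigits?] at h
    subst h; simp [pvGoA, pvGoPure]
  | cons c cs ih =>
    intro ds p cnt counts h
    simp only [pvParseDigits?] at h
    cases hc : PySem.Int.ofChars? [c] with
    | none => rw [hc] at h; simp at h
    | some d =>
      rw [hc] at h
      cases hcs : pvParseDigits? cs with
      | none => rw [hcs] at h; simp at h
      | some ds' =>
        rw [hcs] at h; simp at h
        subst h
        simp only [pvGoA, hc, pvGoPure]
        by_cases h1 : p = d
        · simp [h1, ih ds' d (cnt + 1) counts hcs]
        · by_cases h2 : p > d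
          · simp [h1, h2]
          · simp [h1, h2, ih ds' d 1 (counts.add cnt) hcs]

-- characterisation of A's loop: non-decreasing check fused with run-length collection
theorem pvGoPure_eq (ds : List Int) : ∀ (d cnt : Int) (counts : PySem.Set Int),
    pvGoPure ds d cnt counts =
      (decide (List.IsChain (· ≤ ·) (d :: ds)) &&
        (decide ((2 : Int) ∈ counts) || (pvRunsAux d cnt ds).any (fun r => r.2 == 2))) := by
  induction ds with
  | nil =>
    intro d cnt counts
    simp only [pvGoPure, pvRunsAux, List.isChain_singleton, decide_true, Bool.true_and,
      List.any_cons, List.any_nil, Bool.or_false]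
    by_cases h : (2 : Int) ∈ counts <;> by_cases h2 : cnt = 2 <;>
      simp [PySem.Set.mem_add, h, h2, show ((2:Int) = cnt) ↔ cnt = 2 from eq_comm]
  | cons e es ih =>
    intro d cnt counts
    by_cases h1 : d = e
    · subst h1
      simp only [pvGoPure, ih]
      simp [pvRunsAux, List.isChain_cons_cons]
    · by_cases h2 : d > e
      · simp only [pvGoPure, if_neg h1, if_pos h2]
        have : ¬ (List.IsChain (· ≤ ·) (d :: e :: es)) := by
          simp [List.isChain_cons_cons]; intro h; omega
        simp [this]
      · have hle : d ≤ e := by omega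
        simp only [pvGoPure, if_neg h1, if_neg h2, ih]
        simp [pvRunsAux, h1, List.isChain_cons_cons, hle, PySem.Set.mem_add]
        by_cases hc : (2 : Int) ∈ counts <;> by_cases hcnt : cnt = 2 <;>
          simp [hc, hcnt, beq_eq_decide, show ((2:Int) = cnt) ↔ cnt = 2 from eq_comm]

-- the sortedness test of B is the chain test
theorem pvSorted_iff_chain (l : List Int) :
    l = PySem.List.sorted l (fun x => x) false ↔ List.IsChain (· ≤ ·) l := by
  constructor
  · intro h
    have := PySem.List.sorted_pairwise l (fun x => x)
    rw [← h] at this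
    exact List.isChain_iff_pairwise.mpr (by simpa using this)
  · intro h
    exact (PySem.List.sorted_eq_self_of_pairwise l (fun x => x)
      (by simpa using List.isChain_iff_pairwise.mp h)).symm

-- every char of str(n) for n ≥ 0 parses via int() to a non-negative digit
theorem pvDigitChar_parses (k : Nat) (hk : k < 10) :
    PySem.Int.ofChars? [Nat.digitChar k] = some (k : Int) := by
  interval_cases k <;> decide

theorem pvToDigitsCore_chars (b : Nat) (hb : b = 10) : ∀ (f n : Nat) (tl : List Char),
    (∀ c ∈ tl, ∃ k : Nat, k < 10 ∧ c = Nat.digitChar k) →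
    ∀ c ∈ Nat.toDigitsCore b f n tl, ∃ k : Nat, k < 10 ∧ c = Nat.digitChar k := by
  subst hb
  intro f
  induction f with
  | zero => intro n tl htl c hc; exact htl c hc
  | succ f ih =>
    intro n tl htl c hc
    simp only [Nat.toDigitsCore] at hc
    have hd : ∀ c' ∈ Nat.digitChar (n % 10) :: tl, ∃ k : Nat, k < 10 ∧ c' = Nat.digitChar k := by
      intro c' hc'
      rcases List.mem_cons.mp hc' with h | h
      · exact ⟨n % 10, h ▸ ⟨Nat.mod_lt _ (by omega), rfl⟩⟩
      · exact htl c' h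
    by_cases hz : n / 10 = 0
    · rw [if_pos hz] at hc; exact hd c hc
    · rw [if_neg hz] at hc; exact ih (n / 10) _ hd c hc

theorem pvToDigitsCore_len : ∀ (b f n : Nat) (tl : List Char),
    tl.length < (Nat.toDigitsCore b (f + 1) n tl).length := by
  intro b f
  induction f with
  | zero =>
    intro n tl
    simp only [Nat.toDigitsCore]
    by_cases hz : n / b = 0
    · rw [if_pos hz]; simp
    · rw [if_neg hz]; exact Nat.lt_succ_of_le (le_refl _)
  | succ f ih =>
    intro n tl
    simp only [Nat.toDigitsCore]
    by_cases hz : n / b = 0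
    · rw [if_pos hz]; simp
    · rw [if_neg hz]
      calc tl.length < (Nat.digitChar (n % b) :: tl).length := by simp
        _ < _ := ih (n / b) _

theorem pvToChars_digits (n : Int) (hn : 0 ≤ n) :
    ∀ c ∈ PySem.Int.toChars n, ∃ k : Nat, k < 10 ∧ c = Nat.digitChar k := by
  intro c hc
  unfold PySem.Int.toChars at hc
  rw [if_neg (by omega)] at hc
  exact pvToDigitsCore_chars 10 rfl _ _ [] (by simp) c hc

theorem pvToChars_ne_nil (n : Int) (hn : 0 ≤ n) : PySem.Int.toChars n ≠ [] := by
  unfold PySem.Int.toChars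
  rw [if_neg (by omega)]
  have := pvToDigitsCore_len 10 n.toNat n.toNat []
  intro h
  rw [Nat.toDigits] at h
  rw [h] at this
  simp at this

-- parsing the digit string always succeeds, with non-negative values
theorem pvParse_toChars (cs : List Char)
    (h : ∀ c ∈ cs, ∃ k : Nat, k < 10 ∧ c = Nat.digitChar k) :
    ∃ ds : List Int, pvParseDigits? cs = some ds ∧ (∀ d ∈ ds, 0 ≤ d) ∧ ds.length = cs.length := by
  induction cs with
  | nil => exact ⟨[], rfl, by simp, rfl⟩
  | cons c cs ih =>
    obtain ⟨k, hk, hc⟩ := h c (by simp)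
    obtain ⟨ds, hds, hnn, hlen⟩ := ih (fun c' hc' => h c' (by simp [hc']))
    refine ⟨(k : Int) :: ds, ?_, ?_, by simp [hlen]⟩
    · simp [pvParseDigits?, hc, pvDigitChar_parses k hk, hds]
    · intro d hd
      rcases List.mem_cons.mp hd with h' | h'
      · omega
      · exact hnn d h'

-- ===== VERDICT (by name: the statement is the Claim_ definition above) =====
theorem meetsMoreCriteria_spec : Claim_equal_meetsMoreCriteria := by
  intro number _ hpre
  unfold Spec_meetsMoreCriteria meetsMoreCriteria meetsMoreCriteria_alt
  obtain ⟨ds, hds, hnn, hlen⟩ :=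
    pvParse_toChars (PySem.Int.toChars number) (pvToChars_digits number hpre)
  rw [hds]
  rw [pvGoA_eq_pure _ ds (-1) 1 (PySem.Set.ofList []) hds]
  cases ds with
  | nil =>
    exact absurd (List.length_eq_zero_iff.mp (by simpa using hlen.symm))
      (pvToChars_ne_nil number hpre)
  | cons d ds' =>
    have hd0 : 0 ≤ d := hnn d (by simp)
    have h1 : ¬ ((-1 : Int) = d) := by omega
    have h2 : ¬ ((-1 : Int) > d) := by omega
    simp only [pvGoPure, if_neg h1, if_neg h2]
    rw [pvGoPure_eq]
    have hsort := pvSorted_iff_chain (d :: ds')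
    have hfold : (d :: ds').foldl pvAddRun [] = pvRunsAux d 1 ds' := by
      have : pvAddRun [] d = [] ++ [(d, 1)] := by simp [pvAddRun]
      simp only [List.foldl_cons, this]
      simpa using pvFoldl_addRun ds' [] d 1
    have hmem : ¬ ((2 : Int) ∈ (PySem.Set.ofList ([] : List Int)).add 1) := by decide
    by_cases hch : List.IsChain (· ≤ ·) (d :: ds')
    · rw [if_neg (not_not_intro (hsort.mpr hch))]
      rw [hfold]
      simp [hch]
    · rw [if_pos (fun heq => hch (hsort.mp heq))]
      simp [hch]
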